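-- pv_equiv track=rewrite | github.com/lfy79001/TableQAKit | TableQAKit/numerical/Pointer/reg_hnt/reghnt/new_model.py | generate_question_3split
-- ===== SOURCE A (Python) =====
-- def generate_question_3split(max_seq,max_len,split=3):
--     punc_list=[",","：","；","？","！","，","“","”",",",".","?","，","。","？","．","；","｡"]
--     question_mask = []
--     split=2
--     for i in range(max_seq):
--         question_mask.append([0 for _ in range(split)])
--     for i in range(max_seq,max_len):
--         question_mask.append([1 for _ in range(split)])
--
--     split_size1 = int(max_seq * 0.5)
--
--     for i in range(0,split_size1):
--         question_mask[i][1]=1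
--
--     for i in range(split_size1,max_seq):
--         question_mask[i][0]=1
--     return question_mask
-- ===== SOURCE B (Python) =====
-- def generate_question_3split(max_seq, max_len, split=3):
--     # Column-wise construction: build the two mask columns as flat replicated
--     # blocks, then zip them into rows (instead of building rows and mutating cells).
--     head = max(max_seq, 0)
--     tail = max(max_len - max_seq, 0)
--     half = head // 2
--     col0 = [0] * half + [1] * (head - half) + [1] * tail
--     col1 = [1] * half + [0] * (head - half) + [1] * tail
--     return [[a, b] for a, b in zip(col0, col1)]
-- ===== Notes on version B (the rewrite author's own statement) =====
-- stated objective: simpler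
-- what changed: Instead of A's row-oriented build-then-mutate scheme (append [0,0]/[1,1] rows one by one, then two index loops overwriting single cells, plus dead punc_list and split reassignment), B constructs the two mask columns as flat replicated blocks ([x]*n) and zips them into rows.
import Mathlib
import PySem

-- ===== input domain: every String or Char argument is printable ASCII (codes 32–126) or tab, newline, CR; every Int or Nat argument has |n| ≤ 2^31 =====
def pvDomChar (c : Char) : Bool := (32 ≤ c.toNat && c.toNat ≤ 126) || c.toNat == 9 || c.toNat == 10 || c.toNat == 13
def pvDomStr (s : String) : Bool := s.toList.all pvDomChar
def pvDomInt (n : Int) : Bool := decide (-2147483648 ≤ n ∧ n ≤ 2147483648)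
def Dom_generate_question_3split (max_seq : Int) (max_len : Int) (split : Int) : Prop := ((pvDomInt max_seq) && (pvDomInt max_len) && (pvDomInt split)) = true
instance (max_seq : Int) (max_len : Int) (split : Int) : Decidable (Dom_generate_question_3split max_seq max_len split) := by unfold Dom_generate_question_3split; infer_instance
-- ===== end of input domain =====

-- B builds the two mask columns as replicated blocks and zips them into rows, instead of A's row building plus cell mutation (same cost, simpler).


-- ===== PORT A =====
-- literal port of A; 'int(max_seq * 0.5)' is truncation toward zero, exact as Int.tdiv since |max_seq| ≤ 2^31 < 2^53;
-- the mutation-loop indices i are nonnegative and in range, so 'i.toNat' + List.modify/List.set is exact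
def generate_question_3split (max_seq : Int) (max_len : Int) (split : Int) : List (List Int) :=
  let split : Int := 2
  let qm1 : List (List Int) :=
    (PySem.List.pyRange 0 max_seq 1).foldl
      (fun acc _ => acc ++ [(PySem.List.pyRange 0 split 1).map (fun _ => (0 : Int))]) []
  let qm2 : List (List Int) :=
    (PySem.List.pyRange max_seq max_len 1).foldl
      (fun acc _ => acc ++ [(PySem.List.pyRange 0 split 1).map (fun _ => (1 : Int))]) qm1
  let split_size1 : Int := max_seq.tdiv 2
  let qm3 : List (List Int) :=
    (PySem.List.pyRange 0 split_size1 1).foldl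
      (fun acc i => acc.modify i.toNat (fun row => row.set 1 1)) qm2
  let qm4 : List (List Int) :=
    (PySem.List.pyRange split_size1 max_seq 1).foldl
      (fun acc i => acc.modify i.toNat (fun row => row.set 0 1)) qm3
  qm4

-- ===== PORT B =====
-- port of Source B: '[x]*n' is List.replicate n.toNat x (empty for n ≤ 0), zip+comprehension is zip then map
def generate_question_3split_alt (max_seq : Int) (max_len : Int) (split : Int) : List (List Int) :=
  let head : Int := max max_seq 0
  let tail : Int := max (max_len - max_seq) 0
  let half : Int := PySem.Int.floordiv head 2
  let col0 : List Int :=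
    List.replicate half.toNat 0 ++ List.replicate (head - half).toNat 1 ++ List.replicate tail.toNat 1
  let col1 : List Int :=
    List.replicate half.toNat 1 ++ List.replicate (head - half).toNat 0 ++ List.replicate tail.toNat 1
  (col0.zip col1).map (fun p => [p.1, p.2])

-- ===== PRECONDITION & SPEC =====
def Spec_generate_question_3split (max_seq : Int) (max_len : Int) (split : Int) (out : List (List Int)) : Prop := out = generate_question_3split_alt max_seq max_len split
instance (max_seq : Int) (max_len : Int) (split : Int) (out : List (List Int)) : Decidable (Spec_generate_question_3split max_seq max_len split out) := by unfold Spec_generate_question_3split; infer_instance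

-- ===== CLAIM (what is proved, stated in full; the proofs are below) =====
def Claim_equal_generate_question_3split : Prop := ∀ (max_seq : Int) (max_len : Int) (split : Int), Dom_generate_question_3split max_seq max_len split → Spec_generate_question_3split max_seq max_len split (generate_question_3split max_seq max_len split)

-- ===== LEMMAS AND PROOFS =====

theorem pv_tdiv_two (m : Int) : m.tdiv 2 = if 0 ≤ m then m / 2 else -((-m) / 2) := by
  split_ifs with h
  · exact Int.tdiv_eq_ediv_of_nonneg h ▸ rfl
  · rw [show m = -(-m) by ring, Int.neg_tdiv, Int.tdiv_eq_ediv_of_nonneg (by omega)]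
    simp

theorem pv_getElem?_modify (l : List (List Int)) (i j : Nat) (f : List Int → List Int) :
    (l.modify i f)[j]? = if i = j then l[j]?.map f else l[j]? := by
  rw [List.getElem?_modify]
  cases l[j]? <;> split_ifs <;> simp_all

theorem pv_foldl_modify_getElem? (f : List Int → List Int) (b : Int) :
    ∀ (n : Nat) (a : Int), 0 ≤ a → (b - a).toNat = n → ∀ (qm : List (List Int)) (j : Nat),
      ((PySem.List.pyRange a b 1).foldl (fun acc i => acc.modify i.toNat f) qm)[j]? =
        if a ≤ (j : Int) ∧ (j : Int) < b then qm[j]?.map f else qm[j]? := by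
  intro n
  induction n with
  | zero =>
    intro a ha hn qm j
    rw [PySem.List.pyRange_one_eq_nil (by omega)]
    simp only [List.foldl_nil]
    rw [if_neg (by omega)]
  | succ n ih =>
    intro a ha hn qm j
    rw [PySem.List.pyRange_one_cons (by omega), List.foldl_cons,
        ih (a + 1) (by omega) (by omega), pv_getElem?_modify]
    have hja : a.toNat = j ↔ (j : Int) = a := by omega
    by_cases hj : (j : Int) = a
    · rw [if_pos (hja.mpr hj), if_neg (by omega), if_pos (by omega)]
    · rw [if_neg (fun h => hj (hja.mp h))]
      split_ifs <;> first | rfl | omega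

theorem pv_replicate2_getElem? (p q : Nat) (u v : List Int) (j : Nat) :
    (List.replicate p u ++ List.replicate q v)[j]? =
      if j < p then some u else if j < p + q then some v else none := by
  by_cases hj : j < p
  · rw [List.getElem?_append_left (by simpa using hj), if_pos hj, List.getElem?_replicate, if_pos hj]
  · rw [List.getElem?_append_right (by simpa using hj), if_neg hj, List.length_replicate,
        List.getElem?_replicate]
    split_ifs <;> first | rfl | omega

theorem pv_replicate3_getElem? (p q r : Nat) (u v w : List Int) (j : Nat) :
    (List.replicate p u ++ List.replicate q v ++ List.replicate r w)[j]? =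
      if j < p then some u else if j < p + q then some v else
        if j < p + q + r then some w else none := by
  rw [List.append_assoc]
  by_cases hj : j < p
  · rw [List.getElem?_append_left (by simpa using hj), if_pos hj, List.getElem?_replicate, if_pos hj]
  · rw [List.getElem?_append_right (by simpa using hj), List.length_replicate, if_neg hj,
        pv_replicate2_getElem?]
    split_ifs <;> first | rfl | omega

theorem pv_alt_eq_blocks (max_seq max_len split : Int) :
    generate_question_3split_alt max_seq max_len split =
      List.replicate ((PySem.Int.floordiv (max max_seq 0) 2).toNat) [(0:Int), 1] ++
      List.replicate ((max max_seq 0 - PySem.Int.floordiv (max max_seq 0) 2).toNat) [(1:Int), 0] ++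
      List.replicate ((max (max_len - max_seq) 0).toNat) [(1:Int), 1] := by
  show List.map (fun p => [p.1, p.2]) (List.zip ((_ ++ _ ++ _) : List Int) ((_ ++ _ ++ _) : List Int)) = _
  rw [List.zip_append (by simp), List.zip_append (by simp), List.zip_replicate',
      List.zip_replicate', List.zip_replicate', List.map_append, List.map_append,
      List.map_replicate, List.map_replicate, List.map_replicate]

theorem generate_question_3split_eq (max_seq max_len split : Int) :
    generate_question_3split max_seq max_len split
      = generate_question_3split_alt max_seq max_len split := by
  rw [pv_alt_eq_blocks]
  unfold generate_question_3split
  simp only [PySem.List.foldl_append_singleton_eq_map, List.nil_append, List.map_const',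
    PySem.List.length_pyRange_one]
  have e0 : List.replicate ((2:Int) - 0).toNat (0:Int) = [0, 0] := rfl
  have e1 : List.replicate ((2:Int) - 0).toNat (1:Int) = [1, 1] := rfl
  rw [e0, e1]
  rcases le_or_gt 0 max_seq with hm | hm
  · -- max_seq ≥ 0 : compare elementwise
    have hs := pv_tdiv_two max_seq
    rw [if_pos hm] at hs
    have hs0 : 0 ≤ max_seq.tdiv 2 := by rw [hs]; omega
    have hsm : max_seq.tdiv 2 ≤ max_seq := by rw [hs]; omega
    have hhalf : PySem.Int.floordiv (max max_seq 0) 2 = max_seq.tdiv 2 := by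
      rw [max_eq_left hm, PySem.Int.floordiv_eq_ediv_of_pos (by omega), hs]
    rw [hhalf, max_eq_left hm]
    apply List.ext_getElem?
    intro j
    rw [pv_foldl_modify_getElem? _ _ (max_seq - max_seq.tdiv 2).toNat (max_seq.tdiv 2) hs0 rfl,
        pv_foldl_modify_getElem? _ _ (max_seq.tdiv 2 - 0).toNat 0 le_rfl rfl,
        pv_replicate2_getElem?, pv_replicate3_getElem?]
    split_ifs <;> first | rfl | omega
  · -- max_seq < 0 : everything is the [1,1] tail
    have hs := pv_tdiv_two max_seq
    rw [if_neg (by omega)] at hs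
    have hs0 : max_seq.tdiv 2 ≤ 0 := by rw [hs]; omega
    have hsm : max_seq ≤ max_seq.tdiv 2 := by rw [hs]; omega
    rw [PySem.List.pyRange_one_eq_nil (by omega : max_seq.tdiv 2 ≤ (0:Int)),
        PySem.List.pyRange_one_eq_nil hsm]
    simp only [List.foldl_nil]
    have hz : (max_seq - 0).toNat = 0 := by omega
    have h1 : (PySem.Int.floordiv (max max_seq 0) 2).toNat = 0 := by
      rw [max_eq_right (by omega : max_seq ≤ 0)]
      decide
    have h2 : (max max_seq 0 - PySem.Int.floordiv (max max_seq 0) 2).toNat = 0 := by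
      rw [max_eq_right (by omega : max_seq ≤ 0)]
      decide
    rw [hz, h1, h2]
    simp only [List.replicate_zero, List.nil_append]
    congr 1
    omega

-- ===== VERDICT (by name: the statement is the Claim_ definition above) =====
theorem generate_question_3split_spec : Claim_equal_generate_question_3split := by
  intro max_seq max_len split _
  unfold Spec_generate_question_3split
  exact generate_question_3split_eq max_seq max_len split
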